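-- pv_equiv track=rewrite | github.com/junyu33/gfmul | tests/verify_gfmul.py | mul8
-- ===== SOURCE A (Python) =====
-- def mul8(a: int, b: int):
--     # 确保输入是8位的无符号整数
--     mask_8bit = (1 << 8) - 1
--
--     # 逐位进行非进位乘法，使用 & 操作执行非进位乘法
--     result = 0
--     for i in range(8):
--         # 检查 b 的当前位是否为 1，如果是，执行与 a 的位与操作
--         if (b >> i) & 1:
--             result ^= (a << i)
--
--     # 提取低8位
--     low_8 = result & mask_8bit
--
--     # 提取高8位
--     high_8 = result >> 8
--
--     return low_8, high_8
-- ===== SOURCE B (Python) =====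
-- def mul8(a, b):
--     # Sparse set-bit iteration: mask b to 8 bits once, then loop only over the
--     # set bits of bb, isolating each lowest bit with bb & (bb - 1).
--     result = 0
--     bb = b & 0xff
--     while bb:
--         rest = bb & (bb - 1)        # bb with its lowest set bit cleared
--         result ^= a * (bb ^ rest)   # bb ^ rest is that bit (a power of two)
--         bb = rest
--     return result & 0xff, result >> 8
-- ===== Notes on version B (the rewrite author's own statement) =====
-- stated objective: alternative
-- what changed: Instead of A's fixed 8-iteration loop testing (b>>i)&1 and xoring a<<i, B masks b to 8 bits once and iterates only over the SET bits of bb, isolating each lowest set bit with bb&(bb-1) and xoring a times that power of two.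
import Mathlib
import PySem

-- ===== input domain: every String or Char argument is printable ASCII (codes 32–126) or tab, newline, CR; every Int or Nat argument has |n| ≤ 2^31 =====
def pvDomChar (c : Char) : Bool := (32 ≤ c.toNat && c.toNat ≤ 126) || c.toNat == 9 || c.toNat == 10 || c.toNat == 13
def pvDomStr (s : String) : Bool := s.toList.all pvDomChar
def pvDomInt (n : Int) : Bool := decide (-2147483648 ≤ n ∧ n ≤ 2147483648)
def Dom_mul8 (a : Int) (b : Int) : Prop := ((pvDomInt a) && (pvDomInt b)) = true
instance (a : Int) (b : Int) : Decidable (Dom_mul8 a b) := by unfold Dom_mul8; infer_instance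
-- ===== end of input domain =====

-- B masks b to 8 bits once and iterates only over its SET bits (clearing the
-- lowest set bit with bb & (bb-1)), instead of A's fixed 8-iteration indexed loop.

-- ===== PORT A =====
-- for i in range(8): if (b >> i) & 1: result ^= (a << i); return result & 0xff, result >> 8
def mul8 (a : Int) (b : Int) : Int × Int :=
  let result : Int :=
    (PySem.List.pyRange 0 8 1).foldl
      (fun result i =>
        if PySem.Int.band (b >>> i.toNat) 1 ≠ 0 then PySem.Int.bxor result (a <<< i.toNat)
        else result) 0
  (PySem.Int.band result 255, result >>> (8 : Nat))

-- ===== PORT B =====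
-- the while loop of Source B with state (result, bb); bb = b & 0xff is a nonnegative
-- int < 256 throughout, so it is carried as a Nat (exact on that range);
-- Python's `a * (bb ^ rest)` is `a * ↑(bb ^^^ rest)` (xor of nonnegative ints).
def mul8AltLoop (a : Int) (result : Int) (bb : Nat) : Int :=
  if bb = 0 then result
  else
    let rest := bb &&& (bb - 1)
    mul8AltLoop a (PySem.Int.bxor result (a * ((bb ^^^ rest : Nat) : Int))) rest
termination_by bb
decreasing_by
  have : bb &&& (bb - 1) ≤ bb - 1 := Nat.and_le_right
  omega

def mul8_alt (a : Int) (b : Int) : Int × Int :=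
  let result := mul8AltLoop a 0 (PySem.Int.band b 255).toNat
  (PySem.Int.band result 255, result >>> (8 : Nat))

-- ===== PRECONDITION & SPEC =====
def Spec_mul8 (a : Int) (b : Int) (out : Int × Int) : Prop := out = mul8_alt a b
instance (a : Int) (b : Int) (out : Int × Int) : Decidable (Spec_mul8 a b out) := by unfold Spec_mul8; infer_instance

-- ===== CLAIM (what is proved, stated in full; the proofs are below) =====
def Claim_equal_mul8 : Prop := ∀ (a : Int) (b : Int), Dom_mul8 a b → Spec_mul8 a b (mul8 a b)

-- ===== LEMMAS AND PROOFS =====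

-- the sequence of isolated low bits B's loop consumes, as a list of powers of two
-- (structural recursion on a fuel ≥ bb, so that `decide` can evaluate it)
def pvLowsF : Nat → Nat → List Nat
  | 0, _ => []
  | fuel + 1, bb =>
      if bb = 0 then []
      else
        let rest := bb &&& (bb - 1)
        (bb ^^^ rest) :: pvLowsF fuel rest

def pvLows (bb : Nat) : List Nat := pvLowsF bb bb

-- the set-bit positions (ascending) of an 8-bit value, as A's loop sees them
def pvBits (n : Nat) : List Nat := (List.range 8).filter n.testBit

-- B's loop = a fold of xors over pvLowsF (for any sufficient fuel)
theorem altLoop_eq_foldlF (a : Int) : ∀ (fuel bb : Nat), bb ≤ fuel → ∀ (r : Int),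
    mul8AltLoop a r bb = (pvLowsF fuel bb).foldl (fun (r : Int) (p : Nat) => PySem.Int.bxor r (a * (p : Int))) r := by
  intro fuel
  induction fuel with
  | zero =>
    intro bb hbb r
    have : bb = 0 := by omega
    subst this
    rw [mul8AltLoop]
    rfl
  | succ fuel ih =>
    intro bb hbb r
    rw [mul8AltLoop, pvLowsF]
    by_cases h : bb = 0
    · simp [h]
    · have hle : bb &&& (bb - 1) ≤ fuel := by
        have : bb &&& (bb - 1) ≤ bb - 1 := Nat.and_le_right
        omega
      simp only [if_neg h, List.foldl_cons]
      exact ih _ hle _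

theorem altLoop_eq_foldl (a : Int) (bb : Nat) (r : Int) :
    mul8AltLoop a r bb = (pvLows bb).foldl (fun (r : Int) (p : Nat) => PySem.Int.bxor r (a * (p : Int))) r :=
  altLoop_eq_foldlF a bb bb le_rfl r

-- a fold with an `if` inside = a fold over the filtered list
theorem foldl_if_filter {α : Type} (p : Nat → Bool) (f : α → Nat → α) :
    ∀ (l : List Nat) (r : α),
      l.foldl (fun r i => if p i then f r i else r) r = (l.filter p).foldl f r := by
  intro l
  induction l with
  | nil => intro r; rfl
  | cons x xs ih =>
    intro r
    by_cases h : p x <;> simp [h, ih]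

-- Python's b & 255 is b mod 256
theorem band_255 (b : Int) : PySem.Int.band b 255 = b % 256 := by
  unfold PySem.Int.band
  by_cases hb : 0 ≤ b
  · simp only [if_pos hb, if_pos (by norm_num : (0:Int) ≤ 255)]
    have h1 : b.toNat &&& (255:Int).toNat = b.toNat % 256 := by
      have := Nat.and_two_pow_sub_one_eq_mod b.toNat 8
      simpa using this
    rw [h1]
    omega
  · simp only [if_neg hb, if_pos (by norm_num : (0:Int) ≤ 255)]
    have h1 : (255:Int).toNat &&& (-b - 1).toNat = (-b - 1).toNat % 256 := by
      rw [Nat.and_comm]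
      have := Nat.and_two_pow_sub_one_eq_mod (-b - 1).toNat 8
      simpa using this
    rw [h1]
    omega

-- the bit A tests equals a bit of (b & 255).toNat, for i < 8
theorem cond_testBit (b : Int) (j : Nat) (hj : j < 8) :
    (PySem.Int.band (b >>> j) 1 ≠ 0) ↔ ((PySem.Int.band b 255).toNat.testBit j = true) := by
  rw [band_255, PySem.Int.band_one, PySem.Int.mod_eq_emod_of_pos (by norm_num),
    Int.shiftRight_eq_div_pow, Nat.testBit_eq_decide_div_mod_eq]
  interval_cases j <;> (simp only [decide_eq_true_eq]; push_cast; omega)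

-- the finite heart: for every 8-bit value, the powers B consumes are exactly
-- 2^j for A's set-bit positions j, in the same (ascending) order
set_option maxRecDepth 10000 in
theorem lows_eq_bits : ∀ n < 256, pvLows n = (pvBits n).map (fun j => 2 ^ j) := by
  decide

theorem mul8_eq (a b : Int) : mul8 a b = mul8_alt a b := by
  have hn : (PySem.Int.band b 255).toNat < 256 := by
    rw [band_255]; omega
  -- A's fold, moved from the Int index list to List.range 8
  have hfold : ∀ (l : List Int) (r : Int),
      l.foldl (fun (result : Int) (i : Int) =>
          if PySem.Int.band (b >>> i.toNat) 1 ≠ 0 then PySem.Int.bxor result (a <<< i.toNat)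
          else result) r
        = (l.map Int.toNat).foldl
            (fun (r : Int) (j : Nat) =>
              if PySem.Int.band (b >>> j) 1 ≠ 0 then PySem.Int.bxor r (a <<< j) else r) r := by
    intro l
    induction l with
    | nil => intro r; rfl
    | cons x xs ih => intro r; simp only [List.foldl_cons, List.map_cons]; exact ih _
  have hmap : (PySem.List.pyRange 0 8 1).map Int.toNat = List.range 8 := by decide
  -- replace A's condition by a testBit of n on the members of range 8
  have hcong : (List.range 8).foldl
        (fun (r : Int) (j : Nat) =>
          if PySem.Int.band (b >>> j) 1 ≠ 0 then PySem.Int.bxor r (a <<< j) else r) 0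
      = (List.range 8).foldl
        (fun (r : Int) (j : Nat) =>
          if (PySem.Int.band b 255).toNat.testBit j then PySem.Int.bxor r (a <<< j) else r) 0 := by
    apply PySem.List.foldl_congr_mem
    intro r j hj
    have hj8 : j < 8 := List.mem_range.mp hj
    by_cases h : PySem.Int.band (b >>> j) 1 ≠ 0
    · rw [if_pos h, if_pos ((cond_testBit b j hj8).mp h)]
    · rw [if_neg h]
      rw [if_neg (by intro hc; exact h ((cond_testBit b j hj8).mpr hc))]
  -- shifts as multiplications by powers of two, over the mapped bit list
  have hshift : ∀ (l : List Nat) (r : Int),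
      l.foldl (fun (r : Int) (j : Nat) => PySem.Int.bxor r (a <<< j)) r
        = (l.map (fun j => 2 ^ j)).foldl (fun (r : Int) (p : Nat) => PySem.Int.bxor r (a * (p : Int))) r := by
    intro l
    induction l with
    | nil => intro r; rfl
    | cons x xs ih =>
      intro r
      simp only [List.foldl_cons, List.map_cons]
      rw [Int.shiftLeft_eq]
      push_cast
      exact ih _
  unfold mul8 mul8_alt
  simp only [Int.shiftRight_natCast_right, Int.shiftLeft_natCast_right]
  rw [hfold, hmap, hcong, foldl_if_filter, hshift]
  rw [altLoop_eq_foldl, lows_eq_bits _ hn]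
  rfl

-- ===== VERDICT (by name: the statement is the Claim_ definition above) =====
theorem mul8_spec : Claim_equal_mul8 := by
  intro a b _
  exact mul8_eq a b
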